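-- pv_equiv track=rewrite | github.com/PittYHL/Elastic_MBQC | DP.py | find_qubits
-- ===== SOURCE A (Python) =====
-- def find_qubits(nodes, placed, next):
--     qubit = []
--     new_placed = placed + [next]
--     for i in range(len(nodes)):
--         for node in new_placed:
--             if node in nodes[i]:
--                 qubit.append(i)
--                 break
--     return len(qubit)
-- ===== SOURCE B (Python) =====
-- def find_qubits(nodes, placed, next):
--     index = {}
--     for i, group in enumerate(nodes):
--         for v in group:
--             index.setdefault(v, set()).add(i)
--     hit = set()
--     for v in placed + [next]:
--         hit.update(index.get(v, ()))
--     return len(hit)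
-- ===== Notes on version B (the rewrite author's own statement) =====
-- stated objective: faster
-- what changed: Replaces A's per-group linear membership scan of placed+[next] by a one-pass inverted index (value -> set of group indices) and counts the union of the index-sets of placed+[next].
import Mathlib
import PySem

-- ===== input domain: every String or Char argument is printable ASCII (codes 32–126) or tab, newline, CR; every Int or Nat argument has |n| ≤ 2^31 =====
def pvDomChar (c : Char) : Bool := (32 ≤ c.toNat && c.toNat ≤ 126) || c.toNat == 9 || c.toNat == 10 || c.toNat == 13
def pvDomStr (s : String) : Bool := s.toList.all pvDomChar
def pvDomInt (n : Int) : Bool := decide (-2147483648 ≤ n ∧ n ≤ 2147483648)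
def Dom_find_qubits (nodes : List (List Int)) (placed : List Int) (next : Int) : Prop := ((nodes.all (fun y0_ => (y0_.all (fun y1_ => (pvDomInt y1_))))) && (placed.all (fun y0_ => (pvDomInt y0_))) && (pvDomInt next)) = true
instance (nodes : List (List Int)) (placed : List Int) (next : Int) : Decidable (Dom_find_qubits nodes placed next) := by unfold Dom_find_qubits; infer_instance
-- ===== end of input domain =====

-- B replaces A's per-group scan over placed+[next] by an inverted index (value → set of
-- group indices) built in one pass, then counts the union of the index-sets of placed+[next].

-- ===== PORT A =====
def find_qubits (nodes : List (List Int)) (placed : List Int) (next : Int) : Int :=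
  let new_placed := placed ++ [next]
  -- 'for node in new_placed: if node in nodes[i]: append i; break' appends i iff some node matches
  let qubit : List Int :=
    (PySem.List.pyRange 0 (nodes.length : Int) 1).foldl
      (fun q i =>
        if new_placed.any (fun node => (PySem.List.pyGetD nodes i []).contains node) then q ++ [i]
        else q)
      []
  (qubit.length : Int)

-- ===== PORT B =====
def find_qubits_alt (nodes : List (List Int)) (placed : List Int) (next : Int) : Int :=
  let index : PySem.Dict Int (PySem.Set Int) :=
    (PySem.List.enumerate nodes).foldl
      (fun d p => p.2.foldl
        (fun d v => d.modify v PySem.Set.empty (fun s => PySem.Set.add s p.1)) d)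
      PySem.Dict.empty
  let hit : PySem.Set Int :=
    (placed ++ [next]).foldl
      (fun h v => PySem.Set.update h (index.getD v PySem.Set.empty))
      PySem.Set.empty
  (hit.length : Int)

-- ===== PRECONDITION & SPEC =====
def Spec_find_qubits (nodes : List (List Int)) (placed : List Int) (next : Int) (out : Int) : Prop := out = find_qubits_alt nodes placed next
instance (nodes : List (List Int)) (placed : List Int) (next : Int) (out : Int) : Decidable (Spec_find_qubits nodes placed next out) := by unfold Spec_find_qubits; infer_instance

-- ===== CLAIM (what is proved, stated in full; the proofs are below) =====
def Claim_equal_find_qubits : Prop := ∀ (nodes : List (List Int)) (placed : List Int) (next : Int), Dom_find_qubits nodes placed next → Spec_find_qubits nodes placed next (find_qubits nodes placed next)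

-- ===== LEMMAS AND PROOFS =====

-- membership in the index after processing one group's inner loop
lemma idx_inner (g : List Int) (j : Int) (d : PySem.Dict Int (PySem.Set Int)) (x v : Int) :
    x ∈ (g.foldl (fun d w => d.modify w PySem.Set.empty (fun s => PySem.Set.add s j)) d).getD v PySem.Set.empty
      ↔ x ∈ d.getD v PySem.Set.empty ∨ (x = j ∧ v ∈ g) := by
  induction g generalizing d with
  | nil => simp
  | cons a g ih =>
    simp only [List.foldl_cons, ih, PySem.Dict.getD_modify]
    by_cases hva : v = a
    · subst hva
      rw [if_pos rfl, PySem.Set.mem_add]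
      simp
      tauto
    · rw [if_neg hva]
      simp [hva]

-- membership in the full inverted index
lemma idx_outer (xs : List (List Int)) (s : Int) (d : PySem.Dict Int (PySem.Set Int)) (x v : Int) :
    x ∈ ((PySem.List.enumerate xs s).foldl
          (fun d p => p.2.foldl (fun d w => d.modify w PySem.Set.empty (fun t => PySem.Set.add t p.1)) d) d).getD v PySem.Set.empty
      ↔ x ∈ d.getD v PySem.Set.empty ∨ ∃ k : Nat, ∃ _ : k < xs.length, x = s + k ∧ v ∈ xs[k] := by
  induction xs generalizing s d with
  | nil => simp
  | cons g xs ih =>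
    rw [PySem.List.enumerate_cons, List.foldl_cons, ih, idx_inner]
    constructor
    · rintro (((h | ⟨hx, hg⟩)) | ⟨k, hk, hx, hm⟩)
      · exact Or.inl h
      · exact Or.inr ⟨0, by simp, by simpa using hx, by simpa using hg⟩
      · exact Or.inr ⟨k + 1, by simpa using hk, by push_cast; omega, by simpa using hm⟩
    · rintro (h | ⟨k, hk, hx, hm⟩)
      · exact Or.inl (Or.inl h)
      · cases k with
        | zero => exact Or.inl (Or.inr ⟨by simpa using hx, by simpa using hm⟩)
        | succ k =>
          refine Or.inr ⟨k, by simpa using hk, by push_cast at hx ⊢; omega, by simpa using hm⟩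

-- the union loop: membership
lemma mem_union_loop (l : List Int) (f : Int → PySem.Set Int) (s : PySem.Set Int) (x : Int) :
    x ∈ l.foldl (fun h v => PySem.Set.update h (f v)) s ↔ x ∈ s ∨ ∃ v ∈ l, x ∈ f v := by
  induction l generalizing s with
  | nil => simp
  | cons a l ih =>
    rw [List.foldl_cons, ih]
    simp only [PySem.Set.mem_update, List.mem_cons]
    constructor
    · rintro ((h | h) | ⟨v, hv, hx⟩)
      · exact Or.inl h
      · exact Or.inr ⟨a, Or.inl rfl, h⟩
      · exact Or.inr ⟨v, Or.inr hv, hx⟩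
    · rintro (h | ⟨v, (rfl | hv), hx⟩)
      · exact Or.inl (Or.inl h)
      · exact Or.inl (Or.inr hx)
      · exact Or.inr ⟨v, hv, hx⟩

-- the union loop: no duplicates
lemma nodup_union_loop (l : List Int) (f : Int → PySem.Set Int) (s : PySem.Set Int) (hs : s.Nodup) :
    (l.foldl (fun h v => PySem.Set.update h (f v)) s).Nodup := by
  induction l generalizing s with
  | nil => exact hs
  | cons a l ih => exact ih _ (PySem.Set.nodup_update s (f a) hs)

theorem find_qubits_spec : Claim_equal_find_qubits := by
  intro nodes placed next _
  unfold Spec_find_qubits find_qubits find_qubits_alt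
  simp only []
  rw [PySem.List.foldl_append_if
      (fun i => (placed ++ [next]).any (fun node => (PySem.List.pyGetD nodes i []).contains node))
      (fun i => i)]
  congr 1
  -- both lists are nodup with the same membership, hence a permutation
  have hA : ∀ x : Int,
      x ∈ ((PySem.List.pyRange 0 (nodes.length : Int) 1).filter
            (fun i => (placed ++ [next]).any (fun node => (PySem.List.pyGetD nodes i []).contains node)))
        ↔ ∃ v ∈ placed ++ [next], ∃ k : Nat, ∃ _ : k < nodes.length, x = (k : Int) ∧ v ∈ nodes[k] := by
    intro x
    simp only [List.mem_filter, PySem.List.mem_pyRange_one, List.any_eq_true, List.contains_iff_mem]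
    constructor
    · rintro ⟨⟨hx0, hxn⟩, v, hv, hvn⟩
      refine ⟨v, hv, x.toNat, by omega, by omega, ?_⟩
      rwa [PySem.List.pyGetD_eq_getElem nodes [] hx0 hxn] at hvn
    · rintro ⟨v, hv, k, hk, rfl, hm⟩
      refine ⟨⟨by positivity, by exact_mod_cast hk⟩, v, hv, ?_⟩
      rw [PySem.List.pyGetD_eq_getElem nodes (i := (k : Int)) [] (by positivity) (by exact_mod_cast hk)]
      simpa using hm
  have hB : ∀ x : Int,
      x ∈ ((placed ++ [next]).foldl
            (fun h v => PySem.Set.update h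
              (((PySem.List.enumerate nodes).foldl
                  (fun d p => p.2.foldl (fun d v => d.modify v PySem.Set.empty (fun s => PySem.Set.add s p.1)) d)
                  PySem.Dict.empty).getD v PySem.Set.empty))
            PySem.Set.empty)
        ↔ ∃ v ∈ placed ++ [next], ∃ k : Nat, ∃ _ : k < nodes.length, x = (k : Int) ∧ v ∈ nodes[k] := by
    intro x
    rw [mem_union_loop]
    constructor
    · rintro (h | ⟨v, hv, hx⟩)
      · simp [PySem.Set.empty] at h
      · rw [idx_outer] at hx
        rcases hx with h | ⟨k, hk, hx, hm⟩
        · simp [PySem.Dict.getD_empty, PySem.Set.empty] at h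
        · exact ⟨v, hv, k, hk, by simpa using hx, hm⟩
    · rintro ⟨v, hv, k, hk, rfl, hm⟩
      refine Or.inr ⟨v, hv, ?_⟩
      rw [idx_outer]
      exact Or.inr ⟨k, hk, by simp, hm⟩
  have hperm :
      ((PySem.List.pyRange 0 (nodes.length : Int) 1).filter
        (fun i => (placed ++ [next]).any (fun node => (PySem.List.pyGetD nodes i []).contains node))).Perm
      ((placed ++ [next]).foldl
        (fun h v => PySem.Set.update h
          (((PySem.List.enumerate nodes).foldl
              (fun d p => p.2.foldl (fun d v => d.modify v PySem.Set.empty (fun s => PySem.Set.add s p.1)) d)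
              PySem.Dict.empty).getD v PySem.Set.empty))
        PySem.Set.empty) := by
    rw [List.perm_ext_iff_of_nodup
        ((PySem.List.nodup_pyRange_one 0 (nodes.length : Int)).filter _)
        (nodup_union_loop _ _ _ (by simp [PySem.Set.empty]))]
    intro x
    rw [hA x, hB x]
  simpa using hperm.length_eq
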